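-- pv_equiv track=rewrite | github.com/jk-jung/problem-solving | codewars/6kyu/6_Enigeliisohe too Eniigeeliiisoohee Toroanisoliatooro.py | toexuto
-- ===== SOURCE A (Python) =====
-- def toexuto(text):
--     r = ''
--     for x in text:
--         r += x
--         if x.lower() not in 'aeiou' and 'a' <= x.lower() <= 'z':
--             t = ord(x.lower())
--             while True:
--                 if chr(t) in 'aeiou':
--                     r += chr(t)
--                     break
--                 t -= 1
--
--     return r
-- ===== SOURCE B (Python) =====
-- VOW = (97, 101, 105, 111, 117)  # ordinals of 'aeiou', sorted
--
-- def toexuto(text):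
--     parts = []
--     for x in text:
--         parts.append(x)
--         l = x.lower()
--         if 'a' <= l <= 'z' and l not in 'aeiou':
--             t = ord(l)
--             lo, hi = 0, 4
--             while lo < hi:  # binary search: largest index with VOW[mid] <= t
--                 mid = (lo + hi + 1) // 2
--                 if VOW[mid] <= t:
--                     lo = mid
--                 else:
--                     hi = mid - 1
--             parts.append(chr(VOW[lo]))
--     return ''.join(parts)
-- ===== Notes on version B (the rewrite author's own statement) =====
-- stated objective: alternative
-- what changed: Replaces the inner 'while True: t -= 1' linear downward scan with a binary search over the sorted vowel ordinals (97,101,105,111,117), and builds the result with a parts list joined once instead of repeated string concatenation.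
import Mathlib
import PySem

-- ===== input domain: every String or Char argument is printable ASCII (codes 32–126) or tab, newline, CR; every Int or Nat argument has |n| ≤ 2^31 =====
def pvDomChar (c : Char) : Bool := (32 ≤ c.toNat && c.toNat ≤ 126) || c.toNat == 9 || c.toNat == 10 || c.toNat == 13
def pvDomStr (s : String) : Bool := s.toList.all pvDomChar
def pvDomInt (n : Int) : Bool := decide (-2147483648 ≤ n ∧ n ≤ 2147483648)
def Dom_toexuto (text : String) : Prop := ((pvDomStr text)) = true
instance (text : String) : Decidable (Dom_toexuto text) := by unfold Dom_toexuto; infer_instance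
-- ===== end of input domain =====

-- B replaces A's linear downward vowel scan with a binary search over the sorted vowel
-- ordinals and joins a parts list once instead of repeated string concatenation (alternative).

-- ===== PORT A =====
-- the 'while True: t -= 1' loop of A; for the codes A reaches (98..122) the t = 0 guard is unreachable
def pvVowDown : Nat → Char
  | 0 => 'a'  -- totality guard only (chr(0) is no vowel; Python would loop past 0 forever)
  | t + 1 =>
    if Char.ofNat (t + 1) ∈ ['a', 'e', 'i', 'o', 'u'] then Char.ofNat (t + 1)
    else pvVowDown t

def toexuto (text : String) : String :=
  String.mk (text.toList.foldl (fun r x =>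
    let r := r ++ [x]
    let l := PySem.Chars.lowerChar x
    if !(l == 'a' || l == 'e' || l == 'i' || l == 'o' || l == 'u') && ('a' ≤ l && l ≤ 'z') then
      r ++ [pvVowDown l.toNat]
    else r) [])

-- ===== PORT B =====
def pvVOW : List Nat := [97, 101, 105, 111, 117]

-- the binary-search while loop of B: largest index with pvVOW[mid] ≤ t
-- fuel = hi - lo bounds the iteration count of B's while loop (each step shrinks hi - lo)
def pvBsF : Nat → Nat → Nat → Nat → Nat
  | 0, _, lo, _ => lo
  | fuel + 1, t, lo, hi =>
    if lo < hi then
      let mid := (lo + hi + 1) / 2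
      if pvVOW.getD mid 0 ≤ t then pvBsF fuel t mid hi else pvBsF fuel t lo (mid - 1)
    else lo

def pvBs (t lo hi : Nat) : Nat := pvBsF (hi - lo) t lo hi

def toexuto_alt (text : String) : String :=
  String.mk (text.toList.foldl (fun parts x =>
    let parts := parts ++ [x]
    let l := PySem.Chars.lowerChar x
    if ('a' ≤ l && l ≤ 'z') && !(l == 'a' || l == 'e' || l == 'i' || l == 'o' || l == 'u') then
      parts ++ [Char.ofNat (pvVOW.getD (pvBs l.toNat 0 4) 0)]
    else parts) [])

-- ===== PRECONDITION & SPEC =====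
def Spec_toexuto (text : String) (out : String) : Prop := out = toexuto_alt text
instance (text : String) (out : String) : Decidable (Spec_toexuto text out) := by unfold Spec_toexuto; infer_instance

-- ===== CLAIM (what is proved, stated in full; the proofs are below) =====
def Claim_equal_toexuto : Prop := ∀ (text : String), Dom_toexuto text → Spec_toexuto text (toexuto text)

-- ===== LEMMAS AND PROOFS =====

def pvChunkA (x : Char) : List Char :=
  let l := PySem.Chars.lowerChar x
  if !(l == 'a' || l == 'e' || l == 'i' || l == 'o' || l == 'u') && ('a' ≤ l && l ≤ 'z') then
    [pvVowDown l.toNat]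
  else []

def pvChunkB (x : Char) : List Char :=
  let l := PySem.Chars.lowerChar x
  if ('a' ≤ l && l ≤ 'z') && !(l == 'a' || l == 'e' || l == 'i' || l == 'o' || l == 'u') then
    [Char.ofNat (pvVOW.getD (pvBs l.toNat 0 4) 0)]
  else []

-- the two per-character appendices agree on every character with code < 127
theorem pvChunk_eq_small : ∀ n : Fin 127, pvChunkA (Char.ofNat n.val) = pvChunkB (Char.ofNat n.val) := by
  decide

theorem pvChunk_eq (x : Char) (h : x.toNat < 127) : pvChunkA x = pvChunkB x := by
  have hx : Char.ofNat x.toNat = x := Char.ofNat_toNat x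
  have := pvChunk_eq_small ⟨x.toNat, h⟩
  simpa [hx] using this

theorem pvFold_eq (xs : List Char) (h : ∀ x ∈ xs, pvDomChar x = true) (r : List Char) :
    xs.foldl (fun r x =>
      let r := r ++ [x]
      let l := PySem.Chars.lowerChar x
      if !(l == 'a' || l == 'e' || l == 'i' || l == 'o' || l == 'u') && ('a' ≤ l && l ≤ 'z') then
        r ++ [pvVowDown l.toNat]
      else r) r
    = xs.foldl (fun parts x =>
      let parts := parts ++ [x]
      let l := PySem.Chars.lowerChar x
      if ('a' ≤ l && l ≤ 'z') && !(l == 'a' || l == 'e' || l == 'i' || l == 'o' || l == 'u') then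
        parts ++ [Char.ofNat (pvVOW.getD (pvBs l.toNat 0 4) 0)]
      else parts) r := by
  induction xs generalizing r with
  | nil => rfl
  | cons x xs ih =>
    have hx : pvDomChar x = true := h x (List.mem_cons_self ..)
    have hlt : x.toNat < 127 := by
      simp [pvDomChar] at hx; omega
    have hcomm : (('a' ≤ PySem.Chars.lowerChar x && PySem.Chars.lowerChar x ≤ 'z') &&
          !(PySem.Chars.lowerChar x == 'a' || PySem.Chars.lowerChar x == 'e' || PySem.Chars.lowerChar x == 'i' ||
            PySem.Chars.lowerChar x == 'o' || PySem.Chars.lowerChar x == 'u'))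
        = (!(PySem.Chars.lowerChar x == 'a' || PySem.Chars.lowerChar x == 'e' || PySem.Chars.lowerChar x == 'i' ||
            PySem.Chars.lowerChar x == 'o' || PySem.Chars.lowerChar x == 'u') &&
          ('a' ≤ PySem.Chars.lowerChar x && PySem.Chars.lowerChar x ≤ 'z')) := Bool.and_comm _ _
    have hc := pvChunk_eq x hlt
    simp only [pvChunkA, pvChunkB, hcomm] at hc
    have hstep : (let r' := r ++ [x]
        let l := PySem.Chars.lowerChar x
        if !(l == 'a' || l == 'e' || l == 'i' || l == 'o' || l == 'u') && ('a' ≤ l && l ≤ 'z') then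
          r' ++ [pvVowDown l.toNat]
        else r')
        = (let parts := r ++ [x]
        let l := PySem.Chars.lowerChar x
        if ('a' ≤ l && l ≤ 'z') && !(l == 'a' || l == 'e' || l == 'i' || l == 'o' || l == 'u') then
          parts ++ [Char.ofNat (pvVOW.getD (pvBs l.toNat 0 4) 0)]
        else parts) := by
      simp only [hcomm]
      split
      · simp only [if_pos ‹_›] at hc
        rw [List.cons.injEq] at hc
        rw [hc.1]
      · rfl
    simp only [List.foldl_cons, hstep]
    exact ih (fun y hy => h y (List.mem_cons_of_mem _ hy)) _

-- ===== VERDICT (by name: the statement is the Claim_ definition above) =====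
theorem toexuto_spec : Claim_equal_toexuto := by
  intro text hdom
  unfold Spec_toexuto toexuto toexuto_alt
  have h : ∀ x ∈ text.toList, pvDomChar x = true := by
    simpa [Dom_toexuto, pvDomStr, List.all_eq_true] using hdom
  rw [pvFold_eq _ h]
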